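-- pv_equiv track=rewrite | github.com/asampley/midinet | midi2data.py | ticks2durations
-- ===== SOURCE A (Python) =====
-- def ticks2durations(ticks, duration_categories):
--     """
--     Returns a list of durations corresponding to a number of ticks
--     If there are more ticks than can be represented by a single duration, the list will
--     have a length greater than 1. The durations will be sorted in descending order.
--     """
--     assert(ticks >= 0)
--     assert(duration_categories >= 2)
--
--     if ticks == 0:
--         return [0]
--
--     durations = []
--
--     remaining_ticks = ticks
--     note_ticks = 2 ** (duration_categories - 2)
--     duration = duration_categories - 1
--     while remaining_ticks > 0:
--         if note_ticks <= remaining_ticks: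
--             remaining_ticks -= note_ticks
--             durations += [duration]
--         else:
--             duration -= 1
--             note_ticks //= 2
--     return durations
-- ===== SOURCE B (Python) =====
-- def ticks2durations(ticks, duration_categories):
--     """
--     Returns a list of durations corresponding to a number of ticks
--     If there are more ticks than can be represented by a single duration, the list will
--     have a length greater than 1. The durations will be sorted in descending order.
--     """
--     assert(ticks >= 0)
--     assert(duration_categories >= 2)
--
--     if ticks == 0:
--         return [0]
--
--     base = 2 ** (duration_categories - 2)
--     q, r = divmod(ticks, base)
--     # q copies of the unbounded top duration, then one pass over the binary
--     # digits of the remainder, most significant first.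
--     durations = [duration_categories - 1] * q
--     p = r.bit_length() - 1
--     while p >= 0:
--         if (r // 2 ** p) % 2 == 1:
--             durations.append(p + 1)
--         p -= 1
--     return durations
-- ===== Notes on version B (the rewrite author's own statement) =====
-- stated objective: faster
-- what changed: Replaces the greedy subtract-and-halve state machine by a closed-form divmod by 2^(dc-2) with C-level list multiplication for the repeated top duration, plus a single most-significant-first scan of the remainder's binary digits.
import Mathlib
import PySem

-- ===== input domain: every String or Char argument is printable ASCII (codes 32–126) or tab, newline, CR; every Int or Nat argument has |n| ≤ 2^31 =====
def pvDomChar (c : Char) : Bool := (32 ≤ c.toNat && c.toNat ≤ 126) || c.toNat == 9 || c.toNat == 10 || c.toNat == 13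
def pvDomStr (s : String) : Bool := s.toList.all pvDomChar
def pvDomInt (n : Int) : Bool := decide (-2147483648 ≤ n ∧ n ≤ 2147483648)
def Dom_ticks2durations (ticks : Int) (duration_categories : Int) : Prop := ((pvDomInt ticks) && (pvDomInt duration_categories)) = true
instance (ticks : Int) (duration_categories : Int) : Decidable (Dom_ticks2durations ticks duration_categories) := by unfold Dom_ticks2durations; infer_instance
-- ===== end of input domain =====

-- B replaces A's greedy subtract-and-halve loop by divmod by 2^(dc-2) plus one
-- most-significant-first scan of the remainder's binary digits (alternative decomposition).

-- ===== PORT A =====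
-- A's while loop. The 'note_ticks > 0' conjunct is a totality guard only: when it is
-- false with remaining > 0 the Python loop diverges (returns nothing), and every call
-- made by ticks2durations under Pre_ has note_ticks = 2^k > 0.
def aLoop (remaining note_ticks duration : Int) (durations : List Int) : List Int :=
  if remaining > 0 ∧ note_ticks > 0 then
    if note_ticks ≤ remaining then
      aLoop (remaining - note_ticks) note_ticks duration (durations ++ [duration])
    else
      aLoop remaining (PySem.Int.floordiv note_ticks 2) (duration - 1) durations
  else durations
termination_by (remaining + note_ticks).toNat
decreasing_by
  · omega
  · rw [PySem.Int.floordiv_eq_ediv_of_pos (by omega : (0:Int) < 2)]; omega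

def ticks2durations (ticks : Int) (duration_categories : Int) : List Int :=
  if ticks = 0 then [0]
  else aLoop ticks (2 ^ (duration_categories - 2).toNat) (duration_categories - 1) []

-- ===== PORT B =====
-- B's while loop: scan bit positions p, p-1, …, 0 of r, appending p+1 for each set bit.
def altScan (r : Int) (p : Int) (durations : List Int) : List Int :=
  if p ≥ 0 then
    altScan r (p - 1)
      (if PySem.Int.mod (PySem.Int.floordiv r (2 ^ p.toNat)) 2 = 1 then durations ++ [p + 1]
       else durations)
  else durations
termination_by (p + 1).toNat
decreasing_by omega

def ticks2durations_alt (ticks : Int) (duration_categories : Int) : List Int :=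
  if ticks = 0 then [0]
  else
    let base : Int := 2 ^ (duration_categories - 2).toNat
    let q := PySem.Int.floordiv ticks base
    let r := PySem.Int.mod ticks base
    altScan r ((PySem.Int.bitLength r : Int) - 1)
      (List.replicate q.toNat (duration_categories - 1))

-- ===== PRECONDITION & SPEC =====
-- Pre_ = exactly the inputs passing A's two asserts (elsewhere A raises AssertionError).
def Pre_ticks2durations (ticks : Int) (duration_categories : Int) : Prop :=
  0 ≤ ticks ∧ 2 ≤ duration_categories
instance (ticks : Int) (duration_categories : Int) : Decidable (Pre_ticks2durations ticks duration_categories) := by unfold Pre_ticks2durations; infer_instance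

def pvWitness_ticks2durations : Int × Int := (13, 4)

def Spec_ticks2durations (ticks : Int) (duration_categories : Int) (out : List Int) : Prop := out = ticks2durations_alt ticks duration_categories
instance (ticks : Int) (duration_categories : Int) (out : List Int) : Decidable (Spec_ticks2durations ticks duration_categories out) := by unfold Spec_ticks2durations; infer_instance

-- ===== CLAIM (what is proved, stated in full; the proofs are below) =====
def Claim_equal_ticks2durations : Prop := ∀ (ticks : Int) (duration_categories : Int), Dom_ticks2durations ticks duration_categories → Pre_ticks2durations ticks duration_categories → Spec_ticks2durations ticks duration_categories (ticks2durations ticks duration_categories)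

-- ===== LEMMAS AND PROOFS =====

/-- Accumulator lemma for A's loop. -/
theorem aLoop_append : ∀ (n : Nat) (remaining note_ticks duration : Int) (acc : List Int),
    (remaining + note_ticks).toNat ≤ n →
    aLoop remaining note_ticks duration acc = acc ++ aLoop remaining note_ticks duration [] := by
  intro n
  induction n with
  | zero =>
    intro r nt d acc h
    have hg : ¬ (r > 0 ∧ nt > 0) := by omega
    rw [aLoop, if_neg hg]
    rw [aLoop, if_neg hg]
    simp
  | succ n ih =>
    intro r nt d acc h
    rw [aLoop]; conv_rhs => rw [aLoop]
    by_cases hg : r > 0 ∧ nt > 0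
    · simp only [if_pos hg]
      by_cases hle : nt ≤ r
      · simp only [if_pos hle]
        rw [ih _ _ _ (acc ++ [d]) (by omega), ih _ _ _ ([] ++ [d]) (by omega)]
        simp
      · simp only [if_neg hle]
        have h2 : PySem.Int.floordiv nt 2 = nt / 2 :=
          PySem.Int.floordiv_eq_ediv_of_pos (by omega)
        rw [ih _ _ _ acc (by omega)]
    · simp [hg]

/-- Accumulator lemma for B's loop. -/
theorem altScan_append : ∀ (n : Nat) (r p : Int) (acc : List Int),
    (p + 1).toNat ≤ n →
    altScan r p acc = acc ++ altScan r p [] := by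
  intro n
  induction n with
  | zero =>
    intro r p acc h
    have hg : ¬ (p ≥ 0) := by omega
    rw [altScan, if_neg hg]
    rw [altScan, if_neg hg]
    simp
  | succ n ih =>
    intro r p acc h
    rw [altScan]; conv_rhs => rw [altScan]
    by_cases hg : p ≥ 0
    · simp only [if_pos hg]
      by_cases hb : PySem.Int.mod (PySem.Int.floordiv r (2 ^ p.toNat)) 2 = 1
      · simp only [if_pos hb]
        rw [ih r _ (acc ++ [p + 1]) (by omega), ih r _ ([] ++ [p + 1]) (by omega)]
        simp
      · simp only [if_neg hb]
        rw [ih r _ acc (by omega)]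
    · simp [hg]

/-- Scanning the bits of 0 appends nothing. -/
theorem altScan_zero : ∀ (n : Nat) (p : Int) (acc : List Int),
    (p + 1).toNat ≤ n → altScan 0 p acc = acc := by
  intro n
  induction n with
  | zero =>
    intro p acc h
    have hg : ¬ (p ≥ 0) := by omega
    rw [altScan, if_neg hg]
  | succ n ih =>
    intro p acc h
    rw [altScan]
    by_cases hg : p ≥ 0
    · have h0 : PySem.Int.floordiv 0 (2 ^ p.toNat) = 0 := by
        rw [PySem.Int.floordiv_eq_ediv_of_pos (by positivity)]; simp
      simp only [if_pos hg, h0]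
      rw [if_neg (by norm_num [PySem.Int.mod_eq_emod_of_pos])]
      exact ih _ acc (by omega)
    · simp [hg]

/-- A position above all bits of m holds a 0 bit: the scan just steps down. -/
theorem altScan_high_bit_zero (m p : Int) (acc : List Int)
    (hm : 0 ≤ m) (hlt : m < 2 ^ p.toNat) (hp : 0 ≤ p) :
    altScan m p acc = altScan m (p - 1) acc := by
  rw [altScan]
  have h0 : PySem.Int.floordiv m (2 ^ p.toNat) = 0 := by
    rw [PySem.Int.floordiv_eq_ediv_of_pos (by positivity)]
    exact Int.ediv_eq_zero_of_lt hm hlt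
  simp only [ge_iff_le, if_pos hp, h0]
  rw [if_neg (by norm_num [PySem.Int.mod_eq_emod_of_pos])]

/-- Bits below position j do not see an added 2^j. -/
theorem altScan_add_pow : ∀ (n : Nat) (p : Int) (j : Nat) (m : Int) (acc : List Int),
    (p + 1).toNat ≤ n → 0 ≤ m → p < (j : Int) →
    altScan (m + 2 ^ j) p acc = altScan m p acc := by
  intro n
  induction n with
  | zero =>
    intro p j m acc h hm hpj
    have hg : ¬ (p ≥ 0) := by omega
    rw [altScan, if_neg hg]
    rw [altScan, if_neg hg]
  | succ n ih =>
    intro p j m acc h hm hpj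
    rw [altScan]; conv_rhs => rw [altScan]
    by_cases hg : p ≥ 0
    · have hpt : p.toNat < j := by omega
      have hsplit : (2 : Int) ^ j = 2 ^ (j - p.toNat) * 2 ^ p.toNat := by
        rw [← pow_add]; congr 1; omega
      have hdiv : PySem.Int.floordiv (m + 2 ^ j) (2 ^ p.toNat)
          = PySem.Int.floordiv m (2 ^ p.toNat) + 2 ^ (j - p.toNat) := by
        rw [PySem.Int.floordiv_eq_ediv_of_pos (by positivity),
            PySem.Int.floordiv_eq_ediv_of_pos (by positivity), hsplit,
            Int.add_mul_ediv_right _ _ (by positivity)]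
      have heven : (2 : Int) ^ (j - p.toNat) = 2 * 2 ^ (j - p.toNat - 1) := by
        rw [← pow_succ']; congr 1; omega
      have hmod : PySem.Int.mod (PySem.Int.floordiv (m + 2 ^ j) (2 ^ p.toNat)) 2
          = PySem.Int.mod (PySem.Int.floordiv m (2 ^ p.toNat)) 2 := by
        rw [hdiv, PySem.Int.mod_eq_emod_of_pos (by omega),
            PySem.Int.mod_eq_emod_of_pos (by omega), heven]
        omega
      simp only [ge_iff_le, if_pos hg, hmod]
      by_cases hb : PySem.Int.mod (PySem.Int.floordiv m (2 ^ p.toNat)) 2 = 1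
      · simp only [if_pos hb]; exact ih _ j m _ (by omega) hm (by omega)
      · simp only [if_neg hb]; exact ih _ j m _ (by omega) hm (by omega)
    · rw [if_neg hg, if_neg hg]

/-- Descent: entering A's loop with remaining < note_ticks = 2^j and duration j+1
    produces exactly the binary digits of remaining, scanned from position j-1 down. -/
theorem aLoop_descent : ∀ (j : Nat) (m : Int),
    0 ≤ m → m < 2 ^ j →
    aLoop m (2 ^ j) ((j : Int) + 1) [] = altScan m ((j : Int) - 1) [] := by
  intro j
  induction j with
  | zero =>
    intro m hm hlt
    have : m = 0 := by omega
    subst this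
    rw [aLoop, altScan]
    norm_num
  | succ j ih =>
    intro m hm hlt
    by_cases hm0 : m = 0
    · subst hm0
      rw [aLoop]
      rw [if_neg (by omega)]
      symm
      exact altScan_zero (j + 2) _ _ (by omega)
    · have hmpos : 0 < m := by omega
      rw [aLoop]
      have hpow : (0 : Int) < 2 ^ (j + 1) := by positivity
      rw [if_pos ⟨hmpos, hpow⟩]
      have hnle : ¬ ((2 : Int) ^ (j + 1) ≤ m) := by
        push_neg
        exact_mod_cast hlt
      rw [if_neg hnle]
      have hhalf : PySem.Int.floordiv ((2 : Int) ^ (j + 1)) 2 = 2 ^ j := by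
        rw [PySem.Int.floordiv_eq_ediv_of_pos (by omega), pow_succ,
            Int.mul_ediv_cancel _ (by omega)]
      have hd : (((j + 1 : Nat) : Int) + 1) - 1 = (j : Int) + 1 := by push_cast; ring
      rw [hhalf, hd]
      have hcast : ((j + 1 : Nat) : Int) - 1 = (j : Int) := by push_cast; ring
      rw [hcast]
      by_cases hle : (2 : Int) ^ j ≤ m
      · -- bit j of m is set
        rw [aLoop]
        rw [if_pos ⟨hmpos, by positivity⟩, if_pos hle]
        rw [aLoop_append ((m - 2 ^ j) + 2 ^ j).toNat _ _ _ _ (le_refl _)]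
        have hm2 : m - 2 ^ j < 2 ^ j := by
          have : (m : Int) < 2 ^ (j + 1) := by exact_mod_cast hlt
          have h2 : (2 : Int) ^ (j + 1) = 2 ^ j + 2 ^ j := by rw [pow_succ]; ring
          omega
        rw [ih (m - 2 ^ j) (by omega) hm2]
        have hbit : PySem.Int.mod (PySem.Int.floordiv m (2 ^ ((j : Int)).toNat)) 2 = 1 := by
          have ht : ((j : Int)).toNat = j := by omega
          rw [ht]
          have hdiv1 : PySem.Int.floordiv m (2 ^ j) = 1 := by
            apply (PySem.Int.floordiv_eq_iff_of_pos (by positivity)).mpr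
            have hup : m < 2 * 2 ^ j := by
              have : (m : Int) < 2 ^ (j + 1) := by exact_mod_cast hlt
              rw [pow_succ] at this; omega
            constructor
            · omega
            · have : ((1:Int) + 1) * 2 ^ j = 2 * 2 ^ j := by ring
              omega
          rw [hdiv1]
          decide
        -- right-hand side: unfold one scan step at position j (its bit is set)
        conv_rhs => rw [altScan, if_pos (show (j : Int) ≥ 0 by positivity), if_pos hbit]
        rw [altScan_append (((j : Int) - 1) + 1).toNat m ((j : Int) - 1)
          ([] ++ [(j : Int) + 1]) (le_refl _)]
        have hignore : altScan (m - 2 ^ j) ((j : Int) - 1) [] = altScan m ((j : Int) - 1) [] := by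
          have := altScan_add_pow (((j : Int) - 1) + 1).toNat ((j : Int) - 1) j (m - 2 ^ j) []
            (le_refl _) (by omega) (by omega)
          rw [sub_add_cancel] at this
          exact this.symm
        rw [hignore]
      · -- bit j of m is clear
        push_neg at hle
        rw [ih m hm hle]
        have hstep := altScan_high_bit_zero m (j : Int) [] hm
          (by simpa using hle) (by positivity)
        rw [← hstep]

/-- Top level: A's loop on any m ≥ 0 emits q = m // 2^k copies of k+1,
    then the binary digits of m % 2^k. -/
theorem aLoop_top : ∀ (n : Nat) (k : Nat) (m : Int),
    0 ≤ m → m.toNat ≤ n →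
    aLoop m (2 ^ k) ((k : Int) + 1) []
      = List.replicate (PySem.Int.floordiv m (2 ^ k)).toNat ((k : Int) + 1)
        ++ altScan (PySem.Int.mod m (2 ^ k)) ((k : Int) - 1) [] := by
  intro n
  induction n with
  | zero =>
    intro k m hm hn
    have hm0 : m = 0 := by omega
    subst hm0
    have hq : PySem.Int.floordiv 0 ((2:Int) ^ k) = 0 := by
      rw [PySem.Int.floordiv_eq_ediv_of_pos (by positivity)]; simp
    have hr : PySem.Int.mod 0 ((2:Int) ^ k) = 0 := by
      rw [PySem.Int.mod_eq_emod_of_pos (by positivity)]; simp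
    rw [hq, hr]
    simp only [Int.toNat_zero, List.replicate_zero, List.nil_append]
    exact aLoop_descent k 0 (le_refl _) (by positivity)
  | succ n ih =>
    intro k m hm hn
    have hpow : (0 : Int) < 2 ^ k := by positivity
    by_cases hle : (2 : Int) ^ k ≤ m
    · rw [aLoop]
      rw [if_pos ⟨lt_of_lt_of_le hpow hle, hpow⟩, if_pos hle]
      rw [aLoop_append ((m - 2 ^ k) + 2 ^ k).toNat _ _ _ _ (le_refl _)]
      rw [ih k (m - 2 ^ k) (by omega) (by omega)]
      have hdiv : PySem.Int.floordiv m (2 ^ k)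
          = PySem.Int.floordiv (m - 2 ^ k) (2 ^ k) + 1 := by
        rw [PySem.Int.floordiv_eq_ediv_of_pos hpow, PySem.Int.floordiv_eq_ediv_of_pos hpow]
        have : m = (m - 2 ^ k) + 1 * 2 ^ k := by ring
        rw [this, Int.add_mul_ediv_right _ _ (by omega)]
        ring_nf
      have hmod : PySem.Int.mod m (2 ^ k) = PySem.Int.mod (m - 2 ^ k) (2 ^ k) := by
        rw [PySem.Int.mod_eq_emod_of_pos hpow, PySem.Int.mod_eq_emod_of_pos hpow,
            Int.sub_emod_right]
      have hq0 : 0 ≤ PySem.Int.floordiv (m - 2 ^ k) (2 ^ k) := by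
        rw [PySem.Int.floordiv_eq_ediv_of_pos hpow]
        exact Int.ediv_nonneg (by omega) (by omega)
      rw [hdiv, hmod]
      have htn : (PySem.Int.floordiv (m - 2 ^ k) (2 ^ k) + 1).toNat
          = (PySem.Int.floordiv (m - 2 ^ k) (2 ^ k)).toNat + 1 := by omega
      rw [htn, List.replicate_succ]
      simp
    · push_neg at hle
      have hq : PySem.Int.floordiv m ((2:Int) ^ k) = 0 := by
        rw [PySem.Int.floordiv_eq_ediv_of_pos (by positivity)]
        exact Int.ediv_eq_zero_of_lt hm hle
      have hr : PySem.Int.mod m ((2:Int) ^ k) = m := by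
        rw [PySem.Int.mod_eq_emod_of_pos (by positivity)]
        exact Int.emod_eq_of_lt hm hle
      rw [hq, hr]
      simp only [Int.toNat_zero, List.replicate_zero, List.nil_append]
      exact aLoop_descent k m hm hle

/-- Padding: scanning from any position at or above the top bit of m gives the
    same list as scanning from bitLength m - 1. -/
theorem altScan_pad : ∀ (n : Nat) (p : Int) (m : Int),
    (p + 1).toNat ≤ n → 0 ≤ m → ((PySem.Int.bitLength m : Int) - 1) ≤ p →
    altScan m p [] = altScan m ((PySem.Int.bitLength m : Int) - 1) [] := by
  intro n
  induction n with
  | zero =>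
    intro p m h hm hbl
    have : p = (PySem.Int.bitLength m : Int) - 1 := by omega
    rw [this]
  | succ n ih =>
    intro p m h hm hbl
    by_cases heq : p = (PySem.Int.bitLength m : Int) - 1
    · rw [heq]
    · have hp : 0 ≤ p := by omega
      have hbig : (PySem.Int.bitLength m : Nat) ≤ p.toNat := by omega
      have hlt : m < 2 ^ p.toNat := by
        have h1 := PySem.Int.lt_two_pow_bitLength m
        have h2 : (2 : Nat) ^ PySem.Int.bitLength m ≤ 2 ^ p.toNat :=
          Nat.pow_le_pow_right (by omega) hbig
        have h3 : m.natAbs < 2 ^ p.toNat := lt_of_lt_of_le h1 h2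
        have h4 : ((m.natAbs : Int)) < 2 ^ p.toNat := by exact_mod_cast h3
        omega
      rw [altScan_high_bit_zero m p [] hm hlt hp]
      exact ih (p - 1) m (by omega) hm (by omega)

-- ===== VERDICT (by name: the statement is the Claim_ definition above) =====
theorem ticks2durations_spec : Claim_equal_ticks2durations := by
  unfold Claim_equal_ticks2durations
  intro ticks dc _ hpre
  obtain ⟨ht, hdc⟩ := hpre
  unfold Spec_ticks2durations ticks2durations ticks2durations_alt
  by_cases h0 : ticks = 0
  · rw [if_pos h0, if_pos h0]
  · rw [if_neg h0, if_neg h0]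
    set k : Nat := (dc - 2).toNat with hk
    have hdk : dc - 1 = (k : Int) + 1 := by omega
    have hpow : (0 : Int) < 2 ^ k := by positivity
    rw [hdk, aLoop_top ticks.toNat k ticks ht (le_refl _)]
    set r := PySem.Int.mod ticks ((2:Int) ^ k) with hr
    have hr0 : 0 ≤ r := PySem.Int.mod_nonneg _ hpow
    have hrlt : r < 2 ^ k := PySem.Int.mod_lt _ hpow
    have hblk : (PySem.Int.bitLength r : Nat) ≤ k := by
      by_cases hrz : r = 0
      · rw [hrz, PySem.Int.bitLength_zero]; omega
      · have h1 := PySem.Int.two_pow_bitLength_le r hrz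
        by_contra hcon
        push_neg at hcon
        have h2 : (2 : Nat) ^ k ≤ 2 ^ (PySem.Int.bitLength r - 1) :=
          Nat.pow_le_pow_right (by omega) (by omega)
        have h3 : (2 : Nat) ^ k ≤ r.natAbs := le_trans h2 h1
        have h4 : ((2 : Int)) ^ k ≤ (r.natAbs : Int) := by exact_mod_cast h3
        omega
    rw [altScan_append (((PySem.Int.bitLength r : Int) - 1) + 1).toNat _ _ _ (le_refl _)]
    rw [← altScan_pad (((k : Int) - 1) + 1).toNat ((k : Int) - 1) r (le_refl _) hr0 (by omega)]
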